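-- pv_equiv track=rewrite | github.com/omeralierdemir/LocateOnMaze | FindCorner.py | tekrarSayisiBulma
-- ===== SOURCE A (Python) =====
-- def tekrarSayisiBulma(korNoktalari,mod):  # en çok tekrar eden kordinatı bulup, o koordinatı döndürür ----> [tekrarSayısı,[x,y]]
--
--
--     dizi = []
--     if(mod % 2 == 0):
--
--
--         kopru = [x[1] for x in korNoktalari]
--
--
--     else:
--
--         kopru = [x[0] for x in korNoktalari]
--
--
--
--
--
--     for i in korNoktalari:
--
--         if(mod % 2 == 0):
--
--             dizi.append([kopru.count(i[1]), i])
--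
--         else:
--
--
--             dizi.append([kopru.count(i[0]), i])
--
--
--
--
--
--
--
--
--
--     dizi.sort()
--
--     tekrarSa = dizi[-1][0]
--
--     return dizi[-1][1],tekrarSa
-- ===== SOURCE B (Python) =====
-- def tekrarSayisiBulma(korNoktalari, mod):
--     # one pass: frequency table + linear argmax on (count, coordinate), no sort
--     idx = 1 if mod % 2 == 0 else 0
--     counts = {}
--     for c in korNoktalari:
--         v = c[idx]
--         counts[v] = counts.get(v, 0) + 1
--     best = korNoktalari[0]
--     for c in korNoktalari[1:]:
--         if (counts[c[idx]], c) > (counts[best[idx]], best):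
--             best = c
--     return best, counts[best[idx]]
-- ===== Notes on version B (the rewrite author's own statement) =====
-- stated objective: faster
-- what changed: Replaces the quadratic count-per-element pass (list.count inside the loop) plus a full sort-and-take-last with a single frequency dictionary built in one pass and a linear arg-max scan over (count, coordinate) tuples, removing both the inner count scan and the sort.
import Mathlib
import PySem

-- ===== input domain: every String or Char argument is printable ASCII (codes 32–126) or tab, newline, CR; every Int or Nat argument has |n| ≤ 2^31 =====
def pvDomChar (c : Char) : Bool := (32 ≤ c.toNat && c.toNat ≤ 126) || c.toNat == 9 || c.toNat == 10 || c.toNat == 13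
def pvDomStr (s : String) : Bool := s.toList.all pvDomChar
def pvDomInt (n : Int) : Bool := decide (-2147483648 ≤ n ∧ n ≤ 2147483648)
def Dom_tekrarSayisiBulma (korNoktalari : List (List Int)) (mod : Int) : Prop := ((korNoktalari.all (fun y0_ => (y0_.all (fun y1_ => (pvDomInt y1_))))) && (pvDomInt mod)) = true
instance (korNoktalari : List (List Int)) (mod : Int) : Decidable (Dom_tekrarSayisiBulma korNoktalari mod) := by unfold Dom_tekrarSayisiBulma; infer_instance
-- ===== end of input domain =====

-- B replaces A's per-element list.count pass plus full sort with a one-pass frequency dict and a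
-- linear arg-max scan over (count, coordinate) tuples (faster); return values proved equal below.

-- ===== PORT A =====
def tekrarSayisiBulma (korNoktalari : List (List Int)) (mod : Int) : List Int × Int :=
  -- kopru = [x[1] for x in korNoktalari]  (resp. x[0]); i[k] as pyGetD, in range under Pre_
  let kopru : List Int :=
    if PySem.Int.mod mod 2 = 0 then korNoktalari.map (fun x => PySem.List.pyGetD x 1 0)
    else korNoktalari.map (fun x => PySem.List.pyGetD x 0 0)
  -- for i in korNoktalari: dizi.append([kopru.count(i[k]), i])
  let dizi : List (Int × List Int) :=
    korNoktalari.foldl (fun acc i =>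
      if PySem.Int.mod mod 2 = 0 then acc ++ [(((kopru.count (PySem.List.pyGetD i 1 0)) : Int), i)]
      else acc ++ [(((kopru.count (PySem.List.pyGetD i 0 0)) : Int), i)]) []
  -- dizi.sort()  — Python list comparison = lexicographic (count, coord)
  let s := PySem.List.sorted2 dizi Prod.fst Prod.snd false
  -- dizi[-1]
  let last := PySem.List.pyGetD s (-1) ((0 : Int), ([] : List Int))
  (last.2, last.1)

-- ===== PORT B =====
-- Python tuple comparison (count, coord) < (count', coord'), components written out explicitly
def pyPairLt (a b : Int × List Int) : Bool :=
  decide (a.1 < b.1) || (a.1 == b.1 && decide (a.2 < b.2))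

def tekrarSayisiBulma_alt (korNoktalari : List (List Int)) (mod : Int) : List Int × Int :=
  let idx : Int := if PySem.Int.mod mod 2 = 0 then 1 else 0
  -- counts[v] = counts.get(v, 0) + 1
  let counts : PySem.Dict Int Int :=
    korNoktalari.foldl (fun d c =>
      d.insert (PySem.List.pyGetD c idx 0) (d.getD (PySem.List.pyGetD c idx 0) 0 + 1))
      PySem.Dict.empty
  -- best = korNoktalari[0]; for c in korNoktalari[1:]: update on strict tuple >
  let best := (PySem.List.slice korNoktalari (some 1) none).foldl
      (fun b c =>
        if pyPairLt (counts.getD (PySem.List.pyGetD b idx 0) 0, b)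
                    (counts.getD (PySem.List.pyGetD c idx 0) 0, c) then c else b)
      (PySem.List.pyGetD korNoktalari 0 [])
  (best, counts.getD (PySem.List.pyGetD best idx 0) 0)

-- ===== PRECONDITION & SPEC =====
-- Pre_ excludes exactly the inputs where the Python A raises IndexError: the empty list
-- (dizi[-1] / korNoktalari[0]) and coordinate lists too short for the accessed index i[1] / i[0].
def Pre_tekrarSayisiBulma (korNoktalari : List (List Int)) (mod : Int) : Prop :=
  korNoktalari ≠ [] ∧
    ∀ c ∈ korNoktalari, (if PySem.Int.mod mod 2 = 0 then 2 else 1) ≤ c.length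
instance (korNoktalari : List (List Int)) (mod : Int) : Decidable (Pre_tekrarSayisiBulma korNoktalari mod) := by unfold Pre_tekrarSayisiBulma; infer_instance

def pvWitness_tekrarSayisiBulma : List (List Int) × Int := ([[1, 2], [3, 2], [3, 5]], 0)

def Spec_tekrarSayisiBulma (korNoktalari : List (List Int)) (mod : Int) (out : List Int × Int) : Prop := out = tekrarSayisiBulma_alt korNoktalari mod
instance (korNoktalari : List (List Int)) (mod : Int) (out : List Int × Int) : Decidable (Spec_tekrarSayisiBulma korNoktalari mod out) := by unfold Spec_tekrarSayisiBulma; infer_instance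

-- ===== CLAIM (what is proved, stated in full; the proofs are below) =====
def Claim_equal_tekrarSayisiBulma : Prop := ∀ (korNoktalari : List (List Int)) (mod : Int), Dom_tekrarSayisiBulma korNoktalari mod → Pre_tekrarSayisiBulma korNoktalari mod → Spec_tekrarSayisiBulma korNoktalari mod (tekrarSayisiBulma korNoktalari mod)

-- ===== LEMMAS AND PROOFS =====

-- the key A sorts by: (number of occurrences of the selected coordinate, the coordinate itself)
def keyF (kopru : List Int) (g : List Int → Int) (c : List Int) : Int × List Int :=
  ((kopru.count (g c) : Nat), c)

-- B's frequency dictionary, for a fixed axis accessor g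
def cntF (l : List (List Int)) (g : List Int → Int) : PySem.Dict Int Int :=
  l.foldl (fun d c => d.insert (g c) (d.getD (g c) 0 + 1)) PySem.Dict.empty

-- the comparator PySem.List.sorted2 dizi Prod.fst Prod.snd false inserts by
def bef (a b : Int × List Int) : Bool :=
  decide (a.1 < b.1) || (!decide (b.1 < a.1) && decide (a.2 < b.2))

theorem bef_iff (a b : Int × List Int) :
    bef a b = true ↔ (a.1 < b.1 ∨ (a.1 = b.1 ∧ a.2 < b.2)) := by
  unfold bef
  simp only [Bool.or_eq_true, Bool.and_eq_true, Bool.not_eq_true', decide_eq_true_eq,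
    decide_eq_false_iff_not, not_lt]
  constructor
  · rintro (h | ⟨h1, h2⟩)
    · exact Or.inl h
    · rcases h1.lt_or_eq with h | h
      · exact Or.inl h
      · exact Or.inr ⟨h, h2⟩
  · rintro (h | ⟨h1, h2⟩)
    · exact Or.inl h
    · exact Or.inr ⟨le_of_eq h1, h2⟩

theorem bef_false_iff (a b : Int × List Int) :
    bef a b = false ↔ ¬(a.1 < b.1 ∨ (a.1 = b.1 ∧ a.2 < b.2)) := by
  rw [Bool.eq_false_iff, ne_eq, bef_iff]

theorem pyPairLt_eq_bef (a b : Int × List Int) : pyPairLt a b = bef a b := by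
  have h : pyPairLt a b = true ↔ bef a b = true := by
    unfold pyPairLt
    rw [bef_iff]
    simp only [Bool.or_eq_true, Bool.and_eq_true, beq_iff_eq, decide_eq_true_eq]
  cases hb : bef a b
  · rw [Bool.eq_false_iff, ne_eq, h, hb]; simp
  · exact h.mpr hb

theorem bef_asymm (a b : Int × List Int) (h : bef a b = true) : bef b a = false := by
  rw [bef_iff] at h
  rw [bef_false_iff]
  rintro (hc | ⟨hc1, hc2⟩)
  · rcases h with h | ⟨h1, _⟩
    · exact absurd hc (lt_asymm h)
    · omega
  · rcases h with h | ⟨h1, h2⟩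
    · omega
    · exact absurd hc2 (lt_asymm h2)

theorem bef_conn (a b : Int × List Int) (h1 : bef a b = false) (h2 : bef b a = false) :
    a = b := by
  rw [bef_false_iff] at h1 h2
  have e1 : a.1 = b.1 := by omega
  have hn1 : ¬ a.2 < b.2 := fun hc => h1 (Or.inr ⟨e1, hc⟩)
  have hn2 : ¬ b.2 < a.2 := fun hc => h2 (Or.inr ⟨e1.symm, hc⟩)
  exact Prod.ext e1 (le_antisymm (not_lt.mp hn2) (not_lt.mp hn1))

theorem bef_shift (a b c : Int × List Int) (h1 : bef a b = true) (h2 : bef c b = false) :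
    bef a c = true := by
  rw [bef_iff] at h1 ⊢
  rw [bef_false_iff] at h2
  have hcb : ¬ c.1 < b.1 := fun hc => h2 (Or.inl hc)
  rcases h1 with h | ⟨e, h⟩
  · exact Or.inl (lt_of_lt_of_le h (not_lt.mp hcb))
  · rcases (not_lt.mp hcb).lt_or_eq with hlt | heq
    · exact Or.inl (e ▸ hlt)
    · have hbc : ¬ c.2 < b.2 := fun hx => h2 (Or.inr ⟨heq.symm, hx⟩)
      exact Or.inr ⟨e.trans heq, lt_of_lt_of_le h (not_lt.mp hbc)⟩

theorem bef_irrefl (a : Int × List Int) : bef a a = false := by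
  rw [bef_false_iff]
  rintro (h | ⟨_, h⟩) <;> exact absurd h (lt_irrefl _)

theorem insertBy_ne_nil {α : Type} (r : α → α → Bool) (x : α) (l : List α) :
    PySem.List.insertBy r x l ≠ [] := by
  cases l with
  | nil => simp [PySem.List.insertBy]
  | cons y ys =>
    simp only [PySem.List.insertBy]
    split <;> simp

theorem getLast?_insertBy {α : Type} (r : α → α → Bool) (x : α) (l : List α) :
    (PySem.List.insertBy r x l).getLast? = if l.any (r x) then l.getLast? else some x := by
  induction l with
  | nil => simp [PySem.List.insertBy]
  | cons y ys ih =>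
    simp only [PySem.List.insertBy, List.any_cons]
    by_cases h : r x y = true
    · simp [h, List.getLast?_cons_cons]
    · rw [if_neg h]
      obtain ⟨z, zs, hz⟩ := List.exists_cons_of_ne_nil (insertBy_ne_nil r x ys)
      rw [hz, List.getLast?_cons_cons, ← hz, ih]
      by_cases ha : ys.any (r x) = true
      · rw [if_pos ha, if_pos (by simp [ha])]
        cases ys with
        | nil => simp at ha
        | cons w ws => simp [List.getLast?_cons_cons]
      · simp only [Bool.not_eq_true] at ha
        simp [Bool.eq_false_iff.mpr h, ha]

theorem foldl_insertBy_getLast? {α : Type} (r : α → α → Bool)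
    (hasym : ∀ a b, r a b = true → r b a = false)
    (hconn : ∀ a b, r a b = false → r b a = false → a = b)
    (hshift : ∀ a b c, r a b = true → r c b = false → r a c = true) :
    ∀ (xs acc : List α) (m : α), acc.getLast? = some m → (∀ y ∈ acc, r m y = false) →
      (xs.foldl (fun a x => PySem.List.insertBy r x a) acc).getLast? =
        some (xs.foldl (fun b x => if r b x then x else b) m) := by
  have hirr : ∀ a, r a a = false := by
    intro a
    cases h : r a a
    · rfl
    · have := hasym a a h; simp [h] at this
  intro xs
  induction xs with
  | nil => intro acc m hml _; simpa using hml
  | cons x xs ih =>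
    intro acc m hml hmax
    have hmem : m ∈ acc := List.mem_of_getLast? hml
    simp only [List.foldl_cons]
    by_cases hxm : r x m = true
    · -- x is strictly below the current max: last stays m, B keeps b = m
      have hmx : r m x = false := hasym x m hxm
      have hlast : (PySem.List.insertBy r x acc).getLast? = some m := by
        rw [getLast?_insertBy, if_pos (List.any_eq_true.mpr ⟨m, hmem, hxm⟩), hml]
      have hmax' : ∀ y ∈ PySem.List.insertBy r x acc, r m y = false := by
        intro y hy
        rcases (PySem.List.mem_insertBy r x y acc).mp hy with rfl | hy
        · exact hmx
        · exact hmax y hy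
      rw [ih _ m hlast hmax', hmx, if_neg (by simp)]
    · -- x is not strictly below m: x becomes the new last; B's new b equals x as a value
      have hxm' : r x m = false := by simpa using hxm
      have hnone : ∀ y ∈ acc, r x y = false := by
        intro y hy
        by_contra hc
        rw [Bool.not_eq_false] at hc
        exact absurd (hshift x y m hc (hmax y hy)) (by simp [hxm'])
      have hlast : (PySem.List.insertBy r x acc).getLast? = some x := by
        rw [getLast?_insertBy, if_neg]
        simp only [List.any_eq_true, not_exists]
        rintro y ⟨hy, hr⟩
        exact absurd hr (by simp [hnone y hy])
      have hmax' : ∀ y ∈ PySem.List.insertBy r x acc, r x y = false := by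
        intro y hy
        rcases (PySem.List.mem_insertBy r x y acc).mp hy with rfl | hy
        · exact hirr _
        · exact hnone y hy
      rw [ih _ x hlast hmax']
      by_cases hmxb : r m x = true
      · rw [if_pos hmxb]
      · rw [if_neg hmxb, hconn m x (by simpa using hmxb) hxm']

-- pushing the key function through the arg-max fold
theorem key_foldl_max (key : List Int → Int × List Int) :
    ∀ (l : List (List Int)) (b : List Int),
      l.foldl (fun p c => if bef p (key c) then key c else p) (key b) =
        key (l.foldl (fun p c => if bef (key p) (key c) then c else p) b) := by
  intro l
  induction l with
  | nil => intro b; rfl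
  | cons c cs ih =>
    intro b
    simp only [List.foldl_cons]
    by_cases h : bef (key b) (key c) = true <;> simp [h, ih]

-- the whole computation, for a fixed axis accessor g (g = (·[1]) or (·[0]))
theorem main_lemma (l : List (List Int)) (hl : l ≠ []) (g : List Int → Int) :
    ((PySem.List.pyGetD (PySem.List.sorted2
        (l.foldl (fun acc i => acc ++ [keyF (l.map g) g i]) [])
        Prod.fst Prod.snd false) (-1) ((0 : Int), ([] : List Int))).2,
     (PySem.List.pyGetD (PySem.List.sorted2
        (l.foldl (fun acc i => acc ++ [keyF (l.map g) g i]) [])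
        Prod.fst Prod.snd false) (-1) ((0 : Int), ([] : List Int))).1)
    =
    (((PySem.List.slice l (some 1) none).foldl
        (fun b c => if pyPairLt ((cntF l g).getD (g b) 0, b) ((cntF l g).getD (g c) 0, c)
                    then c else b) (PySem.List.pyGetD l 0 []),
      (cntF l g).getD (g ((PySem.List.slice l (some 1) none).foldl
        (fun b c => if pyPairLt ((cntF l g).getD (g b) 0, b) ((cntF l g).getD (g c) 0, c)
                    then c else b) (PySem.List.pyGetD l 0 []))) 0)) := by
  obtain ⟨c0, rest, rfl⟩ := List.exists_cons_of_ne_nil hl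
  -- B's dictionary lookups are exactly counts over the projected list
  have hcounts : ∀ v, (cntF (c0 :: rest) g).getD v 0 = (((c0 :: rest).map g).count v : Int) := by
    intro v
    unfold cntF
    rw [← List.foldl_map (f := g)
      (g := fun (d : PySem.Dict Int Int) x => d.insert x (d.getD x 0 + 1))]
    rw [PySem.Dict.getD_foldl_insert_add_one]
    simp
  -- A's dizi is the key-decorated list
  have hdizi : (c0 :: rest).foldl
      (fun acc i => acc ++ [keyF ((c0 :: rest).map g) g i]) [] =
      (c0 :: rest).map (keyF ((c0 :: rest).map g) g) := by
    rw [PySem.List.foldl_append_singleton_eq_map]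
    rfl
  -- sorted2 with fst/snd keys is insertion by bef
  have hsorted : ∀ (xs : List (Int × List Int)),
      PySem.List.sorted2 xs Prod.fst Prod.snd false =
        xs.foldl (fun a x => PySem.List.insertBy bef x a) [] := by
    intro xs; rfl
  set key := keyF ((c0 :: rest).map g) g with hkeydef
  -- the last element of the sorted list is the running lexicographic maximum
  have hlast : (PySem.List.sorted2 ((c0 :: rest).map key) Prod.fst Prod.snd false).getLast? =
      some (key ((PySem.List.slice (c0 :: rest) (some 1) none).foldl
        (fun b c => if bef (key b) (key c) then c else b) c0)) := by
    rw [hsorted, List.map_cons, List.foldl_cons]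
    have h0 : (PySem.List.insertBy bef (key c0) []).getLast? = some (key c0) := by
      simp [PySem.List.insertBy]
    have hmax0 : ∀ y ∈ PySem.List.insertBy bef (key c0) [], bef (key c0) y = false := by
      intro y hy
      rcases (PySem.List.mem_insertBy bef (key c0) y []).mp hy with rfl | hy
      · exact bef_irrefl _
      · simp at hy
    rw [foldl_insertBy_getLast? bef bef_asymm bef_conn bef_shift (rest.map key) _ _ h0 hmax0]
    rw [List.foldl_map, key_foldl_max key rest c0, PySem.List.slice_from_one]
    rfl
  -- assemble
  have hne : PySem.List.sorted2 ((c0 :: rest).map key) Prod.fst Prod.snd false ≠ [] := by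
    intro h
    rw [h] at hlast
    simp at hlast
  rw [hdizi]
  rw [PySem.List.pyGetD_neg_one _ _ hne]
  rw [(List.getLast_eq_iff_getLast?_eq_some hne).mpr hlast]
  simp only [pyPairLt_eq_bef, hcounts, PySem.List.pyGetD_zero_cons]
  rfl

-- ===== VERDICT (by name: the statement is the Claim_ definition above) =====
theorem tekrarSayisiBulma_spec : Claim_equal_tekrarSayisiBulma := by
  intro l m _ hpre
  unfold Spec_tekrarSayisiBulma
  have hl : l ≠ [] := hpre.1
  by_cases hm : PySem.Int.mod m 2 = 0
  · have hd : 2 ∣ m := (PySem.Int.mod_eq_zero_iff_dvd m 2).mp hm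
    have := main_lemma l hl (fun x => PySem.List.pyGetD x 1 0)
    simpa [tekrarSayisiBulma, tekrarSayisiBulma_alt, hm, hd, keyF, cntF] using this
  · have hd : ¬ 2 ∣ m := fun h => hm ((PySem.Int.mod_eq_zero_iff_dvd m 2).mpr h)
    have := main_lemma l hl (fun x => PySem.List.pyGetD x 0 0)
    simpa [tekrarSayisiBulma, tekrarSayisiBulma_alt, hm, hd, keyF, cntF] using this
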